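-- pv_equiv track=rewrite | github.com/binary-wizardry/leetcode-solutions | Medium/Smallest Missing Non-negative Integer After Operations.py | findSmallestInteger
-- ===== SOURCE A (Python) =====
-- from typing import List
--
-- def findSmallestInteger(nums: List[int], value: int) -> int:
--     counter = [0] * value
--     for num in nums:
--         counter[num % value] += 1
--
--     number = 0
--     while True:
--         if counter[number % value] == 0:
--             return number
--         else:
--             counter[number % value] -= 1
--         number += 1
-- ===== SOURCE B (Python) =====
-- def findSmallestInteger(nums, value):
--     # Count residues once; for each residue r the k-th non-negative integer with
--     # that residue is r + k*value, so the sequence first gets stuck at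
--     # r + counts[r]*value; the answer is the minimum of these over all residues.
--     counts = {}
--     for num in nums:
--         r = num % value
--         counts[r] = counts.get(r, 0) + 1
--     return min(counts.get(r, 0) * value + r for r in range(value))
-- ===== Notes on version B (the rewrite author's own statement) =====
-- stated objective: alternative
-- what changed: Replaces A's unbounded while-loop that simulates candidate numbers 0,1,2,... (decrementing a fixed-size residue counter list until one hits zero) by a dict residue count plus a closed-form answer: min(counts.get(r,0)*value + r for r in range(value)).
import Mathlib
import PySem

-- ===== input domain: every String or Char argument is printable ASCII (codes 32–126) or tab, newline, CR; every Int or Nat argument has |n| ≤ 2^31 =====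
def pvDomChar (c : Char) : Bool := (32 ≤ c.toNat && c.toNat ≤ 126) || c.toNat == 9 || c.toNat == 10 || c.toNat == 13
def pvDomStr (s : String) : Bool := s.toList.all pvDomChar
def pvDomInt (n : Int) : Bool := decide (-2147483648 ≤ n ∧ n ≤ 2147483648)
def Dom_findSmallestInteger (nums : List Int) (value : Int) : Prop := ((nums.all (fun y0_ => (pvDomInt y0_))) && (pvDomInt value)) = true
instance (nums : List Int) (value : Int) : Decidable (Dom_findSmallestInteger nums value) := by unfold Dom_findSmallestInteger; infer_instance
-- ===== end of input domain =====

-- B replaces A's element-by-element simulation loop by a closed-form minimum over residues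
-- (answer = min over r of counts[r]*value + r), counting residues in a dict; exact same values.

-- ===== PORT A =====
-- the counting for-loop of A: counter[num % value] += 1
def fsiCount (nums : List Int) (value : Int) (counter : List Int) : List Int :=
  nums.foldl (fun c num =>
    PySem.List.pySetD c (PySem.Int.mod num value)
      (PySem.List.pyGetD c (PySem.Int.mod num value) 0 + 1)) counter

-- A's 'while True' loop; the fuel argument only makes the recursion total (never
-- exhausted on inputs satisfying Pre_, see the proofs below)
def fsiLoop (value : Int) : Nat → List Int → Int → Int
  | 0, _, number => number
  | fuel + 1, counter, number =>
    if PySem.List.pyGetD counter (PySem.Int.mod number value) 0 = 0 then number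
    else fsiLoop value fuel
      (PySem.List.pySetD counter (PySem.Int.mod number value)
        (PySem.List.pyGetD counter (PySem.Int.mod number value) 0 - 1))
      (number + 1)

def findSmallestInteger (nums : List Int) (value : Int) : Int :=
  let counter := fsiCount nums value (List.replicate value.toNat 0)
  fsiLoop value (nums.length * value.toNat + value.toNat + 1) counter 0

-- ===== PORT B =====
-- B's counting dict loop: counts[r] = counts.get(r, 0) + 1
def fsiCounts (nums : List Int) (value : Int) : PySem.Dict Int Int :=
  nums.foldl (fun d num =>
    d.insert (PySem.Int.mod num value) (d.getD (PySem.Int.mod num value) 0 + 1))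
    PySem.Dict.empty

def findSmallestInteger_alt (nums : List Int) (value : Int) : Int :=
  let counts := fsiCounts nums value
  (PySem.List.min?
    ((PySem.List.pyRange 0 value 1).map (fun r => counts.getD r 0 * value + r))
    (fun x => x)).getD 0

-- ===== PRECONDITION & SPEC =====
-- Pre_ excludes exactly value ≤ 0: there Python A raises (ZeroDivisionError for
-- value = 0, IndexError for value < 0 since counter is empty), as does B.
def Pre_findSmallestInteger (nums : List Int) (value : Int) : Prop := 1 ≤ value
instance (nums : List Int) (value : Int) : Decidable (Pre_findSmallestInteger nums value) := by
  unfold Pre_findSmallestInteger; infer_instance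
def pvWitness_findSmallestInteger : List Int × Int := ([1, 2, 3], 2)

def Spec_findSmallestInteger (nums : List Int) (value : Int) (out : Int) : Prop := out = findSmallestInteger_alt nums value
instance (nums : List Int) (value : Int) (out : Int) : Decidable (Spec_findSmallestInteger nums value out) := by unfold Spec_findSmallestInteger; infer_instance

-- ===== CLAIM (what is proved, stated in full; the proofs are below) =====
def Claim_equal_findSmallestInteger : Prop := ∀ (nums : List Int) (value : Int), Dom_findSmallestInteger nums value → Pre_findSmallestInteger nums value → Spec_findSmallestInteger nums value (findSmallestInteger nums value)

-- ===== LEMMAS AND PROOFS =====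

-- the r-th "failure point" of A's loop started at `number`, with residue counts f
def fsiTerm (f : Int → Int) (value number r : Int) : Int :=
  f r * value + number + ((r - number) % value)

def fsiTerms (f : Int → Int) (value number : Int) : List Int :=
  (PySem.List.pyRange 0 value 1).map (fsiTerm f value number)

def fsiMin (f : Int → Int) (value number : Int) : Int :=
  (PySem.List.min? (fsiTerms f value number) (fun x => x)).getD 0

lemma fsiMin_spec (f : Int → Int) (value number : Int) (hv : 1 ≤ value) (m : Int)
    (hmem : m ∈ fsiTerms f value number)
    (hmin : ∀ y ∈ fsiTerms f value number, m ≤ y) :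
    fsiMin f value number = m := by
  unfold fsiMin
  cases hx : PySem.List.min? (fsiTerms f value number) (fun x => x) with
  | none =>
      exact absurd ((PySem.List.min?_eq_none_iff _ _).1 hx ▸ hmem) (List.not_mem_nil)
  | some x =>
      have hxmem := PySem.List.min?_mem hx
      have hxle := PySem.List.min?_isMin hx
      simp only [Option.getD_some]
      exact le_antisymm (hxle m hmem) (hmin x hxmem)

lemma fsiTerm_ge (f : Int → Int) (value number r : Int) (hv : 1 ≤ value)
    (hf : 0 ≤ f r) : number ≤ fsiTerm f value number r := by
  unfold fsiTerm
  have h1 : 0 ≤ (r - number) % value := Int.emod_nonneg _ (by omega)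
  nlinarith

lemma fsiTerms_ge (f : Int → Int) (value number : Int) (hv : 1 ≤ value)
    (hf : ∀ r, 0 ≤ r → r < value → 0 ≤ f r) :
    ∀ y ∈ fsiTerms f value number, number ≤ y := by
  intro y hy
  unfold fsiTerms at hy
  obtain ⟨r, hr, rfl⟩ := List.mem_map.1 hy
  obtain ⟨hr0, hr1⟩ := PySem.List.mem_pyRange_one.1 hr
  exact fsiTerm_ge f value number r hv (hf r hr0 hr1)

-- the residue of `number` contributes the term f r0 * value + number
lemma fsiTerm_self (f : Int → Int) (value number : Int) (hv : 1 ≤ value) :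
    fsiTerm f value number (number % value) = f (number % value) * value + number := by
  unfold fsiTerm
  have : (number % value - number) % value = 0 := by
    simp [Int.sub_emod, Int.emod_emod_of_dvd]
  omega

-- one step of A's loop leaves every term unchanged
lemma fsiTerm_step (f : Int → Int) (value number r : Int) (hv : 1 ≤ value)
    (h0 : 0 ≤ r) (h1 : r < value) :
    fsiTerm (fun x => if x = number % value then f x - 1 else f x) value (number + 1) r
      = fsiTerm f value number r := by
  have hvne : value ≠ 0 := by omega
  have hmod : ∀ a : Int, (a - (number + 1)) % value = (a - number - 1) % value := by
    intro a; ring_nf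
  have key : ∀ a : Int, (a - 1) % value = (a % value - 1) % value := by
    intro a
    rw [Int.sub_emod a 1, Int.sub_emod (a % value) 1, Int.emod_emod_of_dvd _ dvd_rfl]
  have hneg : (0 - 1 : Int) % value = value - 1 := by
    have h2 : (0 - 1 : Int) % value = (value - 1) % value := by
      apply Int.emod_eq_emod_iff_emod_sub_eq_zero.2
      have h3 : (0 - 1 - (value - 1) : Int) = -value := by ring
      rw [h3]
      simp
    rw [h2, Int.emod_eq_of_lt (by omega) (by omega)]
  by_cases hr : r = number % value
  · subst hr
    have hd : (number % value - number) % value = 0 := by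
      simp [Int.sub_emod, Int.emod_emod_of_dvd]
    have hd1 : (number % value - number - 1) % value = value - 1 := by
      rw [key (number % value - number), hd, hneg]
    unfold fsiTerm
    rw [hmod, hd1, hd]
    simp only [if_true]
    ring
  · have he0 : 0 ≤ (r - number) % value := Int.emod_nonneg _ hvne
    have he1 : (r - number) % value < value := Int.emod_lt_of_pos _ (by omega)
    have hene : (r - number) % value ≠ 0 := by
      intro h
      have hmm : r % value = number % value :=
        Int.emod_eq_emod_iff_emod_sub_eq_zero.2 h
      exact hr (by rw [← Int.emod_eq_of_lt h0 h1, hmm])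
    have hd1 : (r - number - 1) % value = (r - number) % value - 1 := by
      rw [key (r - number), Int.emod_eq_of_lt (by omega) (by omega)]
    unfold fsiTerm
    rw [hmod, hd1]
    simp only [if_neg hr]
    ring

lemma fsiTerms_step (f : Int → Int) (value number : Int) (hv : 1 ≤ value) :
    fsiTerms (fun x => if x = number % value then f x - 1 else f x) value (number + 1)
      = fsiTerms f value number := by
  unfold fsiTerms
  refine List.map_congr_left ?_
  intro r hr
  obtain ⟨h0, h1⟩ := PySem.List.mem_pyRange_one.1 hr
  exact fsiTerm_step f value number r hv h0 h1

-- A's while loop computes the minimum failure point, given enough fuel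
lemma fsiLoop_eq (value : Int) (hv : 1 ≤ value) :
    ∀ (fuel : Nat) (counter : List Int) (number : Int),
    counter.length = value.toNat →
    (∀ r : Int, 0 ≤ r → r < value → 0 ≤ PySem.List.pyGetD counter r 0) →
    fsiMin (fun r => PySem.List.pyGetD counter r 0) value number < number + fuel →
    fsiLoop value fuel counter number
      = fsiMin (fun r => PySem.List.pyGetD counter r 0) value number := by
  intro fuel
  induction fuel with
  | zero =>
      intro counter number hlen hpos hfuel
      exfalso
      have hne : fsiTerms (fun r => PySem.List.pyGetD counter r 0) value number ≠ [] := by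
        unfold fsiTerms
        have h00 : (0 : Int) ∈ PySem.List.pyRange 0 value 1 :=
          PySem.List.mem_pyRange_one.2 ⟨le_refl _, by omega⟩
        intro h
        simp only [List.map_eq_nil_iff] at h
        rw [h] at h00
        exact List.not_mem_nil h00
      cases hx : PySem.List.min? (fsiTerms (fun r => PySem.List.pyGetD counter r 0) value number) (fun x => x) with
      | none => exact hne ((PySem.List.min?_eq_none_iff _ _).1 hx)
      | some x =>
          have hxmem := PySem.List.min?_mem hx
          have hge := fsiTerms_ge (fun r => PySem.List.pyGetD counter r 0) value number hv hpos x hxmem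
          unfold fsiMin at hfuel
          rw [hx] at hfuel
          simp only [Option.getD_some] at hfuel
          omega
  | succ fuel ih =>
      intro counter number hlen hpos hfuel
      have hvpos : 0 < value := by omega
      have hmodd : PySem.Int.mod number value = number % value :=
        PySem.Int.mod_eq_emod_of_pos hvpos
      have hr0 : 0 ≤ number % value := Int.emod_nonneg _ (by omega)
      have hr1 : number % value < value := Int.emod_lt_of_pos _ hvpos
      rw [fsiLoop, hmodd]
      by_cases hz : PySem.List.pyGetD counter (number % value) 0 = 0
      · rw [if_pos hz]
        have hself := fsiTerm_self (fun r => PySem.List.pyGetD counter r 0) value number hv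
        simp only [] at hself
        rw [hz] at hself
        simp only [zero_mul, zero_add] at hself
        have hmem : number ∈ fsiTerms (fun r => PySem.List.pyGetD counter r 0) value number := by
          unfold fsiTerms
          exact List.mem_map.2 ⟨number % value, PySem.List.mem_pyRange_one.2 ⟨hr0, hr1⟩, hself⟩
        exact (fsiMin_spec _ _ _ hv number hmem (fsiTerms_ge _ _ _ hv hpos)).symm
      · rw [if_neg hz]
        have hklen : (number % value).toNat < counter.length := by omega
        have hkn : number % value = (((number % value).toNat : Nat) : Int) := by omega
        set counter' := PySem.List.pySetD counter (number % value)
          (PySem.List.pyGetD counter (number % value) 0 - 1) with hc'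
        have hlen' : counter'.length = value.toNat := by
          rw [hc', PySem.List.length_pySetD]; exact hlen
        have hgetk : PySem.List.pyGetD counter' (number % value) 0
            = PySem.List.pyGetD counter (number % value) 0 - 1 := by
          conv_lhs => rw [hc', hkn]
          rw [PySem.List.pyGetD_pySetD_natCast counter _ _ _ _ hklen, if_pos rfl, ← hkn]
        have hgetne : ∀ r : Int, 0 ≤ r → r < value → r ≠ number % value →
            PySem.List.pyGetD counter' r 0 = PySem.List.pyGetD counter r 0 := by
          intro r h0 h1 hne
          have hrn : r = ((r.toNat : Nat) : Int) := by omega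
          conv_lhs => rw [hc', hkn, hrn]
          rw [PySem.List.pyGetD_pySetD_natCast counter _ _ _ _ hklen,
            if_neg (by omega), ← hrn]
        have hfun : fsiTerms (fun r => PySem.List.pyGetD counter' r 0) value (number + 1)
            = fsiTerms (fun r => PySem.List.pyGetD counter r 0) value number := by
          rw [← fsiTerms_step (fun r => PySem.List.pyGetD counter r 0) value number hv]
          unfold fsiTerms
          refine List.map_congr_left ?_
          intro r hr
          obtain ⟨h0, h1⟩ := PySem.List.mem_pyRange_one.1 hr
          simp only [fsiTerm]
          by_cases he : r = number % value
          · rw [if_pos he, he, hgetk]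
          · rw [if_neg he, hgetne r h0 h1 he]
        have hminEq : fsiMin (fun r => PySem.List.pyGetD counter' r 0) value (number + 1)
            = fsiMin (fun r => PySem.List.pyGetD counter r 0) value number := by
          unfold fsiMin; rw [hfun]
        have hpos' : ∀ r : Int, 0 ≤ r → r < value → 0 ≤ PySem.List.pyGetD counter' r 0 := by
          intro r h0 h1
          by_cases he : r = number % value
          · rw [he, hgetk]
            have := hpos (number % value) hr0 hr1
            omega
          · rw [hgetne r h0 h1 he]; exact hpos r h0 h1
        have hlt' : fsiMin (fun r => PySem.List.pyGetD counter' r 0) value (number + 1)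
            < number + 1 + fuel := by
          rw [hminEq]
          push_cast at hfuel
          omega
        rw [ih counter' (number + 1) hlen' hpos' hlt', hminEq]

-- counting: A's list fold and B's dict fold agree pointwise on [0, value),
-- with the counters staying between their start value and start value + #elements
lemma fsiFold_inv (value : Int) (hv : 1 ≤ value) :
    ∀ (nums : List Int) (c : List Int) (d : PySem.Dict Int Int),
    c.length = value.toNat →
    (∀ r : Int, 0 ≤ r → r < value → PySem.List.pyGetD c r 0 = d.getD r 0) →
    (fsiCount nums value c).length = value.toNat ∧
    (∀ r : Int, 0 ≤ r → r < value →
      PySem.List.pyGetD (fsiCount nums value c) r 0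
        = (nums.foldl (fun d num =>
            d.insert (PySem.Int.mod num value) (d.getD (PySem.Int.mod num value) 0 + 1)) d).getD r 0 ∧
      PySem.List.pyGetD (fsiCount nums value c) r 0
        ≤ PySem.List.pyGetD c r 0 + (nums.length : Int) ∧
      PySem.List.pyGetD c r 0 ≤ PySem.List.pyGetD (fsiCount nums value c) r 0) := by
  intro nums
  induction nums with
  | nil =>
      intro c d hlen hagree
      refine ⟨hlen, ?_⟩
      intro r h0 h1
      exact ⟨hagree r h0 h1, by simp [fsiCount], by simp [fsiCount]⟩
  | cons num rest ih =>
      intro c d hlen hagree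
      have hvpos : 0 < value := by omega
      have hmodd : PySem.Int.mod num value = num % value :=
        PySem.Int.mod_eq_emod_of_pos hvpos
      have hk0 : 0 ≤ num % value := Int.emod_nonneg _ (by omega)
      have hk1 : num % value < value := Int.emod_lt_of_pos _ hvpos
      have hklen : (num % value).toNat < c.length := by omega
      have hkn : num % value = (((num % value).toNat : Nat) : Int) := by omega
      set c' := PySem.List.pySetD c (num % value)
        (PySem.List.pyGetD c (num % value) 0 + 1) with hc'
      set d' := d.insert (num % value) (d.getD (num % value) 0 + 1) with hd'
      have hlen' : c'.length = value.toNat := by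
        rw [hc', PySem.List.length_pySetD]; exact hlen
      have hgetk : PySem.List.pyGetD c' (num % value) 0
          = PySem.List.pyGetD c (num % value) 0 + 1 := by
        conv_lhs => rw [hc', hkn]
        rw [PySem.List.pyGetD_pySetD_natCast c _ _ _ _ hklen, if_pos rfl, ← hkn]
      have hgetne : ∀ r : Int, 0 ≤ r → r < value → r ≠ num % value →
          PySem.List.pyGetD c' r 0 = PySem.List.pyGetD c r 0 := by
        intro r h0 h1 hne
        have hrn : r = ((r.toNat : Nat) : Int) := by omega
        conv_lhs => rw [hc', hkn, hrn]
        rw [PySem.List.pyGetD_pySetD_natCast c _ _ _ _ hklen, if_neg (by omega), ← hrn]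
      have hagree' : ∀ r : Int, 0 ≤ r → r < value →
          PySem.List.pyGetD c' r 0 = d'.getD r 0 := by
        intro r h0 h1
        rw [hd', PySem.Dict.getD_insert]
        by_cases he : r = num % value
        · rw [if_pos he, he, hgetk, hagree (num % value) hk0 hk1]
        · rw [if_neg he, hgetne r h0 h1 he, hagree r h0 h1]
      have hstep : fsiCount (num :: rest) value c = fsiCount rest value c' := by
        simp only [fsiCount, List.foldl_cons, hmodd, hc']
      obtain ⟨hl2, h2⟩ := ih c' d' hlen' hagree'
      refine ⟨by rw [hstep]; exact hl2, ?_⟩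
      intro r h0 h1
      obtain ⟨ha, hb, hcle⟩ := h2 r h0 h1
      have hstepc : PySem.List.pyGetD c r 0 ≤ PySem.List.pyGetD c' r 0 ∧
          PySem.List.pyGetD c' r 0 ≤ PySem.List.pyGetD c r 0 + 1 := by
        by_cases he : r = num % value
        · rw [he, hgetk]; omega
        · rw [hgetne r h0 h1 he]; omega
      refine ⟨?_, ?_, ?_⟩
      · rw [hstep, ha]
        simp only [List.foldl_cons, hmodd, hd']
      · rw [hstep]
        have hlc : ((num :: rest).length : Int) = (rest.length : Int) + 1 := by
          simp
        omega
      · rw [hstep]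
        omega

lemma replicate_pyGetD (n : Nat) (r : Int) (h0 : 0 ≤ r) :
    PySem.List.pyGetD (List.replicate n (0 : Int)) r 0 = 0 := by
  rw [PySem.List.pyGetD_of_nonneg _ _ h0]
  simp only [List.getD_eq_getElem?_getD, List.getElem?_replicate]
  split_ifs <;> simp

-- ===== VERDICT (by name: the statement is the Claim_ definition above) =====
theorem findSmallestInteger_spec : Claim_equal_findSmallestInteger := by
  intro nums value _ hpre
  unfold Pre_findSmallestInteger at hpre
  unfold Spec_findSmallestInteger
  have hvpos : 0 < value := by omega
  -- the two counting loops agree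
  obtain ⟨hlen, hall⟩ := fsiFold_inv value hpre nums (List.replicate value.toNat 0)
    PySem.Dict.empty (by simp)
    (by intro r h0 h1
        rw [replicate_pyGetD _ _ h0, PySem.Dict.getD_empty])
  have hpos : ∀ r : Int, 0 ≤ r → r < value →
      0 ≤ PySem.List.pyGetD (fsiCount nums value (List.replicate value.toNat 0)) r 0 := by
    intro r h0 h1
    have := (hall r h0 h1).2.2
    rw [replicate_pyGetD _ _ h0] at this
    exact this
  have hub : ∀ r : Int, 0 ≤ r → r < value →
      PySem.List.pyGetD (fsiCount nums value (List.replicate value.toNat 0)) r 0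
        ≤ (nums.length : Int) := by
    intro r h0 h1
    have := (hall r h0 h1).2.1
    rw [replicate_pyGetD _ _ h0] at this
    omega
  -- the terms list of A's counter equals B's term list
  have heq : fsiTerms (fun r => PySem.List.pyGetD (fsiCount nums value (List.replicate value.toNat 0)) r 0) value 0
      = (PySem.List.pyRange 0 value 1).map (fun r => (fsiCounts nums value).getD r 0 * value + r) := by
    unfold fsiTerms
    refine List.map_congr_left ?_
    intro r hr
    obtain ⟨h0, h1⟩ := PySem.List.mem_pyRange_one.1 hr
    simp only [fsiTerm]
    rw [(hall r h0 h1).1]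
    have hm : (r - 0) % value = r := by
      rw [sub_zero, Int.emod_eq_of_lt h0 h1]
    rw [hm]
    unfold fsiCounts
    ring
  -- fuel suffices
  have hfuel : fsiMin (fun r => PySem.List.pyGetD (fsiCount nums value (List.replicate value.toNat 0)) r 0) value 0
      < 0 + ((nums.length * value.toNat + value.toNat + 1 : Nat) : Int) := by
    set L := fsiTerms (fun r => PySem.List.pyGetD (fsiCount nums value (List.replicate value.toNat 0)) r 0) value 0 with hL
    have hmem0 : fsiTerm (fun r => PySem.List.pyGetD (fsiCount nums value (List.replicate value.toNat 0)) r 0) value 0 0 ∈ L := by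
      rw [hL]
      unfold fsiTerms
      exact List.mem_map.2 ⟨0, PySem.List.mem_pyRange_one.2 ⟨le_refl _, hvpos⟩, rfl⟩
    have ht0 : fsiTerm (fun r => PySem.List.pyGetD (fsiCount nums value (List.replicate value.toNat 0)) r 0) value 0 0
        = PySem.List.pyGetD (fsiCount nums value (List.replicate value.toNat 0)) 0 0 * value := by
      simp only [fsiTerm]
      norm_num
    cases hx : PySem.List.min? L (fun x => x) with
    | none =>
        exfalso
        have := (PySem.List.min?_eq_none_iff L (fun x => x)).1 hx
        rw [this] at hmem0
        exact List.not_mem_nil hmem0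
    | some m =>
        have hle : m ≤ PySem.List.pyGetD (fsiCount nums value (List.replicate value.toNat 0)) 0 0 * value := by
          have := PySem.List.min?_isMin hx _ hmem0
          rw [ht0] at this
          exact this
        have hcb := hub 0 (le_refl _) hvpos
        have hc0 := hpos 0 (le_refl _) hvpos
        have hmul : PySem.List.pyGetD (fsiCount nums value (List.replicate value.toNat 0)) 0 0 * value
            ≤ (nums.length : Int) * value :=
          mul_le_mul_of_nonneg_right hcb (by omega)
        have hvv : ((value.toNat : Nat) : Int) = value := by omega
        unfold fsiMin
        rw [← hL, hx]
        simp only [Option.getD_some]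
        push_cast
        rw [hvv]
        linarith
  have hloop := fsiLoop_eq value hpre (nums.length * value.toNat + value.toNat + 1)
    (fsiCount nums value (List.replicate value.toNat 0)) 0 hlen hpos hfuel
  show findSmallestInteger nums value = findSmallestInteger_alt nums value
  unfold findSmallestInteger findSmallestInteger_alt
  simp only []
  rw [hloop]
  unfold fsiMin
  rw [heq]
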